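-- pv_equiv track=rewrite | github.com/yannickloth/W33-Theory | tools/h27_fiber_edge_rule.py | solve_linear_mod3
-- ===== SOURCE A (Python) =====
-- def row_reduce_mod3(mat, vec=None):
--     """Row reduce matrix (and optional rhs) over F3."""
--     m = [list(row) for row in mat]
--     b = list(vec) if vec is not None else None
--     n_rows = len(m)
--     n_cols = len(m[0]) if n_rows else 0
--     rank = 0
--     col = 0
--     pivots = []
--     while rank < n_rows and col < n_cols:
--         pivot = None
--         for r in range(rank, n_rows):
--             if m[r][col] % 3 != 0:
--                 pivot = r
--                 break
--         if pivot is None: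
--             col += 1
--             continue
--         m[rank], m[pivot] = m[pivot], m[rank]
--         if b is not None:
--             b[rank], b[pivot] = b[pivot], b[rank]
--         inv = 1 if m[rank][col] == 1 else 2
--         m[rank] = [(inv * x) % 3 for x in m[rank]]
--         if b is not None:
--             b[rank] = (inv * b[rank]) % 3
--         for r in range(n_rows):
--             if r == rank:
--                 continue
--             factor = m[r][col] % 3
--             if factor != 0:
--                 m[r] = [(m[r][c] - factor * m[rank][c]) % 3 for c in range(n_cols)]
--                 if b is not None:
--                     b[r] = (b[r] - factor * b[rank]) % 3
--         pivots.append(col)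
--         rank += 1
--         col += 1
--     return rank, m, b, pivots
--
-- def solve_linear_mod3(A, b):
--     """Solve A x = b over F3. Return one solution or None."""
--     rank, rref, b2, pivots = row_reduce_mod3(A, b)
--     # check consistency
--     for i in range(rank, len(A)):
--         if b2[i] % 3 != 0:
--             return None
--     n_cols = len(A[0])
--     x = [0] * n_cols
--     # set free vars to 0
--     for i, col in enumerate(pivots):
--         x[col] = b2[i]
--     return x
-- ===== SOURCE B (Python) =====
-- def solve_linear_mod3(A, b):
--     """Solve A x = b over F3. Return one solution or None.
--
--     Forward elimination only: rows flow from a `todo` worklist into a `done`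
--     list of finished (pivot_col, row, rhs) echelon rows -- finished rows are
--     never touched again -- followed by an explicit back-substitution pass
--     over the pivots in reverse with all free variables pinned to 0.
--     """
--     n_cols = len(A[0])
--     done = []                       # finished pivot rows: (pivot_col, row, rhs)
--     todo = [(list(r)[:n_cols], v) for r, v in zip(A, b)]
--     for col in range(n_cols):
--         if not todo:
--             break
--         p = next((i for i, (row, _) in enumerate(todo) if row[col] % 3 != 0), None)
--         if p is None:
--             continue
--         prow, prhs = todo[p]
--         rest = todo[1:p] + [todo[0]] + todo[p + 1:] if p else todo[1:]
--         inv = 1 if prow[col] == 1 else 2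
--         prow = [(inv * v) % 3 for v in prow]
--         prhs = (inv * prhs) % 3
--
--         def reduce(t):
--             row, rhs = t
--             f = row[col] % 3
--             if f == 0:
--                 return t
--             return ([(v - f * w) % 3 for v, w in zip(row, prow)], (rhs - f * prhs) % 3)
--
--         todo = [reduce(t) for t in rest]
--         done.append((col, prow, prhs))
--     if any(rhs % 3 != 0 for _, rhs in todo):
--         return None
--     x = [0] * n_cols
--     for col, row, rhs in reversed(done):
--         x[col] = (rhs - sum(v * y for v, y in zip(row, x))) % 3
--     return x
-- ===== Notes on version B (the rewrite author's own statement) =====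
-- stated objective: alternative
-- what changed: B replaces A's Gauss-Jordan sweep (which eliminates the pivot column in all other rows, including the finished ones above, and reads the solution straight off the reduced rhs) by forward elimination only - rows flow from a todo worklist into a done list of echelon rows that are never touched again - followed by an explicit back-substitution pass over the pivots in reverse with free variables pinned to 0.
-- outside the precondition, e.g. on solve_linear_mod3([[0, 0], [1]], [0, 1]): A returns [1, 0], B returns [1, 0]; on solve_linear_mod3([[0], [0]], [1]): A returns None, B returns None; on solve_linear_mod3([[0], [1]], [1]): A raises IndexError, B returns None
import Mathlib
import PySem

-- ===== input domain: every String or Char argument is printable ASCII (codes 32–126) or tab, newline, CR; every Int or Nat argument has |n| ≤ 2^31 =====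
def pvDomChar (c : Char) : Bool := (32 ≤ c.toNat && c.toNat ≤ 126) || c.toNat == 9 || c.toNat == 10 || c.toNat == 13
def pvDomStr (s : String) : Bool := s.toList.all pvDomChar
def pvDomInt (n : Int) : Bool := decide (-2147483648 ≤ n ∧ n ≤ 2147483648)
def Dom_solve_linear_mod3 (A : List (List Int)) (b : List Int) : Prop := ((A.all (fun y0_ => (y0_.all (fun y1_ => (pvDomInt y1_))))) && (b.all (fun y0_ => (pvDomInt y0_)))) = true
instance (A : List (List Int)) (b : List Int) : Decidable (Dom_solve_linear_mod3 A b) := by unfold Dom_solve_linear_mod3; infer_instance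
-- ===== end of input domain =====

-- B replaces A's Gauss–Jordan sweep (which eliminates the pivot column in ALL other rows and
-- reads the answer straight off the reduced rhs) by forward elimination only — rows move from a
-- `todo` worklist into a `done` echelon list and finished rows are never touched again —
-- followed by an explicit back-substitution pass over the pivots in reverse (free variables 0).
-- Same cost class, different algorithmic decomposition; neither version mutates its arguments.

-- ===== PORT A =====
-- for r in range(rank, n_rows): if m[r][col] % 3 != 0: pivot = r; break
def pvFindPivot (m : List (List Int)) (col : Nat) : List Nat → Option Nat
  | [] => none
  | r :: rest => if ((m.getD r []).getD col 0) % 3 ≠ 0 then some r else pvFindPivot m col rest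

-- the inner 'for r in range(n_rows)' elimination loop of row_reduce_mod3 (b is always present here)
def pvElimRows (n_rows n_cols rank col : Nat) (mb : List (List Int) × List Int) : List (List Int) × List Int :=
  (List.range n_rows).foldl (fun mb r =>
    if r = rank then mb
    else
      let factor := ((mb.1.getD r []).getD col 0) % 3
      if factor ≠ 0 then
        (mb.1.set r ((List.range n_cols).map (fun c =>
            ((mb.1.getD r []).getD c 0 - factor * ((mb.1.getD rank []).getD c 0)) % 3)),
         mb.2.set r ((mb.2.getD r 0 - factor * mb.2.getD rank 0) % 3))
      else mb) mb

-- the while-loop of row_reduce_mod3; col increases every iteration, so fuel = n_cols - col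
def pvRowReduceLoop (n_rows n_cols : Nat) : Nat → List (List Int) → List Int → Nat → Nat → List Nat → Nat × List (List Int) × List Int × List Nat
  | 0, m, b, rank, _col, pivots => (rank, m, b, pivots)
  | fuel+1, m, b, rank, col, pivots =>
    if rank < n_rows ∧ col < n_cols then
      match pvFindPivot m col (List.range' rank (n_rows - rank)) with
      | none => pvRowReduceLoop n_rows n_cols fuel m b rank (col+1) pivots
      | some pivot =>
        let m1 := (m.set rank (m.getD pivot [])).set pivot (m.getD rank [])
        let b1 := (b.set rank (b.getD pivot 0)).set pivot (b.getD rank 0)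
        let inv : Int := if (m1.getD rank []).getD col 0 = 1 then 1 else 2
        let m2 := m1.set rank ((m1.getD rank []).map (fun x => (inv * x) % 3))
        let b2 := b1.set rank ((inv * (b1.getD rank 0)) % 3)
        let mb := pvElimRows n_rows n_cols rank col (m2, b2)
        pvRowReduceLoop n_rows n_cols fuel mb.1 mb.2 (rank+1) (col+1) (pivots ++ [col])
    else (rank, m, b, pivots)

-- '%' on Int with the positive literal divisor 3 is Lean's emod = Python's '%' (exact here)
def solve_linear_mod3 (A : List (List Int)) (b : List Int) : Option (List Int) :=
  let n_rows := A.length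
  let n_cols := if n_rows ≠ 0 then (A.getD 0 []).length else 0
  let res := pvRowReduceLoop n_rows n_cols n_cols A b 0 0 []
  let rank := res.1
  let b2 := res.2.2.1
  let pivots := res.2.2.2
  -- for i in range(rank, len(A)): if b2[i] % 3 != 0: return None
  if (List.range' rank (A.length - rank)).any (fun i => (b2.getD i 0) % 3 != 0) then none
  else
    -- n_cols = len(A[0]); IndexError on empty A is excluded by Pre_
    let n_cols2 := (A.getD 0 []).length
    let x0 := (List.range n_cols2).map (fun _ => (0 : Int))
    some ((pivots.foldl (fun (st : Nat × List Int) col =>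
            (st.1 + 1, st.2.set col (b2.getD st.1 0))) (0, x0)).2)

-- ===== PORT B =====
-- the inner 'def reduce(t)' of Source B
def pvReduceRow (col : Nat) (prow : List Int) (prhs : Int) (t : List Int × Int) : List Int × Int :=
  let f := t.1.getD col 0 % 3
  if f = 0 then t
  else (List.zipWith (fun v w => (v - f * w) % 3) t.1 prow, (t.2 - f * prhs) % 3)

-- the 'for col in range(n_cols)' forward-elimination loop of Source B over the (row, rhs) worklist
def pvForward (n_cols : Nat) : List Nat → List (Nat × List Int × Int) → List (List Int × Int) → List (Nat × List Int × Int) × List (List Int × Int)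
  | [], done, todo => (done, todo)
  | col :: cols, done, todo =>
    if todo = [] then (done, todo)
    else
      match (todo.zipIdx.find? (fun t => t.1.1.getD col 0 % 3 != 0)).map Prod.snd with
      | none => pvForward n_cols cols done todo
      | some p =>
        let prow0 := (todo.getD p ([], 0)).1
        let prhs0 := (todo.getD p ([], 0)).2
        let rest := if p = 0 then todo.drop 1
                    else (todo.drop 1).take (p - 1) ++ [todo.getD 0 ([], 0)] ++ todo.drop (p + 1)
        let inv : Int := if prow0.getD col 0 = 1 then 1 else 2
        let prow := prow0.map (fun v => (inv * v) % 3)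
        let prhs := (inv * prhs0) % 3
        pvForward n_cols cols (done ++ [(col, prow, prhs)]) (rest.map (pvReduceRow col prow prhs))

def solve_linear_mod3_alt (A : List (List Int)) (b : List Int) : Option (List Int) :=
  let n_cols := (A.getD 0 []).length     -- len(A[0]); empty A excluded by Pre_
  let init := List.zipWith (fun (r : List Int) v => (r.take n_cols, v)) A b
  let res := pvForward n_cols (List.range n_cols) [] init
  if res.2.any (fun t => t.2 % 3 != 0) then none
  else
    -- for col, row, rhs in reversed(done): x[col] = (rhs - sum(v*y for v,y in zip(row,x))) % 3
    some (res.1.reverse.foldl (fun (x : List Int) d =>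
        x.set d.1 ((d.2.2 - (List.zipWith (fun v y => v * y) d.2.1 x).sum) % 3))
      (List.replicate n_cols 0))

-- ===== PRECONDITION & SPEC =====
-- Pre_ excludes: empty A (A raises IndexError on len(A[0])); ragged matrices with a row shorter
-- than the first row, and rhs b shorter than A — on those A usually raises IndexError and returns
-- a value only in degenerate runs whose result depends on which entries the elimination happens
-- to touch.  Rows LONGER than the first row are admitted.
def Pre_solve_linear_mod3 (A : List (List Int)) (b : List Int) : Prop :=
  A ≠ [] ∧ (∀ row ∈ A, (A.getD 0 []).length ≤ row.length) ∧ A.length ≤ b.length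
instance (A : List (List Int)) (b : List Int) : Decidable (Pre_solve_linear_mod3 A b) := by
  unfold Pre_solve_linear_mod3; infer_instance

def pvWitness_solve_linear_mod3 : List (List Int) × List Int := ([[1, 2], [0, 4]], [2, 1])

def Spec_solve_linear_mod3 (A : List (List Int)) (b : List Int) (out : Option (List Int)) : Prop := out = solve_linear_mod3_alt A b
instance (A : List (List Int)) (b : List Int) (out : Option (List Int)) : Decidable (Spec_solve_linear_mod3 A b out) := by unfold Spec_solve_linear_mod3; infer_instance

-- ===== CLAIM (what is proved, stated in full; the proofs are below) =====
def Claim_equal_solve_linear_mod3 : Prop := ∀ (A : List (List Int)) (b : List Int), Dom_solve_linear_mod3 A b → Pre_solve_linear_mod3 A b → Spec_solve_linear_mod3 A b (solve_linear_mod3 A b)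

-- ===== LEMMAS AND PROOFS =====

-- proof-only: the mod-3 value of entry c of A's current augmented row i (row truncated to n_cols)
def pvJ (n_cols : Nat) (m : List (List Int)) (b : List Int) (i c : Nat) : ZMod 3 :=
  ((((m.getD i []).take n_cols ++ [b.getD i 0]).getD c 0 : Int) : ZMod 3)

-- proof-only: the mod-3 value of entry c of B's finished augmented row i
def pvE (done : List (Nat × List Int × Int)) (i c : Nat) : ZMod 3 :=
  (((((done.getD i (0, [], 0)).2.1) ++ [(done.getD i (0, [], 0)).2.2]).getD c 0 : Int) : ZMod 3)

-- proof-only: pivot column of finished row j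
def pvP (done : List (Nat × List Int × Int)) (j : Nat) : Nat := (done.getD j (0, [], 0)).1

-- proof-only: the simultaneous-state invariant tying A's loop state to B's
def pvRel (n_rows n_cols blen col : Nat) (m : List (List Int)) (b : List Int)
    (rank : Nat) (pivots : List Nat)
    (done : List (Nat × List Int × Int)) (todo : List (List Int × Int)) : Prop :=
  m.length = n_rows ∧ b.length = blen ∧ n_rows ≤ blen
  ∧ (∀ row ∈ m, n_cols ≤ row.length)
  ∧ rank ≤ n_rows ∧ rank = done.length
  ∧ pivots = done.map (fun d => d.1)
  ∧ pivots.Pairwise (· < ·) ∧ (∀ q ∈ pivots, q < col)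
  ∧ (∀ d ∈ done, d.2.1.length = n_cols)
  ∧ todo = (List.range' rank (n_rows - rank)).map (fun i => ((m.getD i []).take n_cols, b.getD i 0))
  ∧ (∀ i < rank, 0 ≤ b.getD i 0 ∧ b.getD i 0 < 3)
  ∧ (∀ i < rank, ∀ c : Nat, pvJ n_cols m b i c
      = pvE done i c - ∑ j ∈ Finset.Ico (i+1) rank, pvE done i (pvP done j) * pvJ n_cols m b j c)

-- proof-only: first-match readout of the final solution vector
def pvLook (ps : List Nat) (i0 : Nat) (b2 : List Int) (c : Nat) : Int :=
  match ps with
  | [] => 0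
  | q :: ps => if q = c then b2.getD i0 0 else pvLook ps (i0+1) b2 c

lemma pv_getD_mem (m : List (List Int)) (r : Nat) (h : r < m.length) : m.getD r [] ∈ m := by
  rw [List.getD_eq_getElem _ _ h]; exact List.getElem_mem h

lemma pv_getD_take {α : Type} (l : List α) (d : α) (n c : Nat) (hc : c < n) :
    (l.take n).getD c d = l.getD c d := by
  rcases Nat.lt_or_ge c l.length with h | h
  · rw [List.getD_eq_getElem _ _ (by simp [List.length_take]; omega),
        List.getD_eq_getElem _ _ h, List.getElem_take]
  · rw [List.getD_eq_default _ _ (by simp [List.length_take]; omega),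
        List.getD_eq_default _ _ h]

lemma pvRow_getD (row : List Int) (x : Int) (n col : Nat) (hc : col < n) (hn : n ≤ row.length) :
    (row.take n ++ [x]).getD col 0 = row.getD col 0 := by
  have hlt : col < (row.take n).length := by simp [List.length_take]; omega
  rw [List.getD_eq_getElem _ _ (by simp [List.length_take]; omega),
      List.getD_eq_getElem _ _ (by omega), List.getElem_append_left hlt, List.getElem_take]

lemma pvRow_getD_last (row : List Int) (x : Int) (n : Nat) (hn : n ≤ row.length) :
    (row.take n ++ [x]).getD n 0 = x := by
  have hl : (row.take n).length = n := by simp [List.length_take]; omega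
  rw [List.getD_eq_getElem _ _ (by simp [List.length_take]; omega),
      List.getElem_append_right (by omega)]
  simp [hl]

lemma pvFindPivot_eq (m : List (List Int)) (col : Nat) : ∀ rs : List Nat,
    pvFindPivot m col rs = rs.find? (fun r => (m.getD r []).getD col 0 % 3 != 0)
  | [] => rfl
  | r :: rest => by
      rcases eq_or_ne (((m.getD r []).getD col 0) % 3) 0 with h | h
      · rw [pvFindPivot, if_neg (not_not_intro h), List.find?_cons_of_neg (by simpa using h),
            pvFindPivot_eq m col rest]
      · rw [pvFindPivot, if_pos h, List.find?_cons_of_pos (by simpa using h)]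

lemma pv_find?_congr {α : Type} (p q : α → Bool) : ∀ (l : List α), (∀ x ∈ l, p x = q x) → l.find? p = l.find? q
  | [], _ => rfl
  | x :: l, h => by
      rw [List.find?_cons, List.find?_cons, h x (by simp)]
      split
      · rfl
      · exact pv_find?_congr p q l (fun y hy => h y (by simp [hy]))

lemma pv_any_congr {α : Type} (p q : α → Bool) : ∀ (l : List α), (∀ x ∈ l, p x = q x) → l.any p = l.any q
  | [], _ => rfl
  | x :: l, h => by
      rw [List.any_cons, List.any_cons, h x (by simp),
          pv_any_congr p q l (fun y hy => h y (by simp [hy]))]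

lemma pv_zipWith_take (h : Int → Int → Int) (x y : List Int) (n : Nat)
    (hx : n ≤ x.length) (hy : n ≤ y.length) :
    List.zipWith h (x.take n) (y.take n) = (List.range n).map (fun c => h (x.getD c 0) (y.getD c 0)) := by
  apply List.ext_getElem
  · simp [List.length_zipWith, List.length_take]; omega
  · intro i h1 h2
    have hi : i < n := by simpa using h2
    simp only [List.getElem_zipWith, List.getElem_take, List.getElem_map, List.getElem_range]
    rw [List.getD_eq_getElem _ _ (by omega), List.getD_eq_getElem _ _ (by omega)]

-- once rank has reached n_rows, A's while-loop exits immediately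
lemma pvRowReduce_stop (n_rows n_cols rank : Nat) (h : n_rows ≤ rank)
    (fuel : Nat) (m : List (List Int)) (b : List Int) (col : Nat) (piv : List Nat) :
    pvRowReduceLoop n_rows n_cols fuel m b rank col piv = (rank, m, b, piv) := by
  cases fuel with
  | zero => rfl
  | succ fuel => rw [pvRowReduceLoop, if_neg (by omega)]

-- once todo is empty, B's remaining column loop does nothing
lemma pvForward_stuck (n_cols : Nat) : ∀ (cols : List Nat) (done : List (Nat × List Int × Int)),
    pvForward n_cols cols done [] = (done, [])
  | [], _ => rfl
  | col :: cols, done => by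
      rw [pvForward, if_pos rfl]

-- the abstract one-pivot-step preservation of the Jordan-vs-echelon invariant, over ZMod 3
lemma pvInvStep (k : Nat) (vJ vJ' vE : Nat → Nat → ZMod 3) (piv : Nat → Nat)
    (hstep : ∀ i < k, ∀ c, vJ' i c = vJ i c - vJ i (piv k) * vE k c)
    (hk : ∀ c, vJ' k c = vE k c)
    (hINV : ∀ i < k, ∀ c, vJ i c = vE i c - ∑ j ∈ Finset.Ico (i+1) k, vE i (piv j) * vJ j c) :
    ∀ i < k+1, ∀ c, vJ' i c = vE i c - ∑ j ∈ Finset.Ico (i+1) (k+1), vE i (piv j) * vJ' j c := by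
  intro i hi c
  rcases eq_or_lt_of_le (Nat.lt_succ_iff.mp hi) with rfl | hik
  · simp [hk]
  · rw [Finset.sum_Ico_succ_top (by omega), hk]
    have hsub : ∀ j ∈ Finset.Ico (i+1) k, vE i (piv j) * vJ' j c
        = vE i (piv j) * vJ j c - vE i (piv j) * (vJ j (piv k) * vE k c) := by
      intro j hj
      have hjk := (Finset.mem_Ico.mp hj).2
      rw [hstep j hjk c]; ring
    rw [Finset.sum_congr rfl hsub, Finset.sum_sub_distrib]
    rw [hstep i hik c, hINV i hik c, hINV i hik (piv k)]
    rw [sub_mul, Finset.sum_mul]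
    simp only [mul_assoc]
    ring

-- A's inner elimination fold, characterized row by row
def pvStepA (n_cols rank col : Nat) (mb : List (List Int) × List Int) (r : Nat) : List (List Int) × List Int :=
  if r = rank then mb
  else
    let factor := ((mb.1.getD r []).getD col 0) % 3
    if factor ≠ 0 then
      (mb.1.set r ((List.range n_cols).map (fun c =>
          ((mb.1.getD r []).getD c 0 - factor * ((mb.1.getD rank []).getD c 0)) % 3)),
       mb.2.set r ((mb.2.getD r 0 - factor * mb.2.getD rank 0) % 3))
    else mb

lemma pvElimRows_eq_foldl (n_rows n_cols rank col : Nat) (mb : List (List Int) × List Int) :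
    pvElimRows n_rows n_cols rank col mb = (List.range n_rows).foldl (pvStepA n_cols rank col) mb := rfl

-- small getD utilities
lemma pv_getD_set_self {α : Type} (l : List α) (i : Nat) (v d : α) (h : i < l.length) :
    (l.set i v).getD i d = v := by
  rw [List.getD_eq_getElem _ _ (by simpa using h), List.getElem_set_self]

lemma pv_getD_set_ne {α : Type} (l : List α) (i j : Nat) (v d : α) (h : i ≠ j) :
    (l.set i v).getD j d = l.getD j d := by
  rcases Nat.lt_or_ge j l.length with hj | hj
  · rw [List.getD_eq_getElem _ _ (by simpa using hj), List.getD_eq_getElem _ _ hj,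
        List.getElem_set_ne h]
  · rw [List.getD_eq_default _ _ (by simpa using hj), List.getD_eq_default _ _ hj]

lemma pv_getD_append_lt {α : Type} (l l' : List α) (i : Nat) (d : α) (h : i < l.length) :
    (l ++ l').getD i d = l.getD i d := by
  rw [List.getD_eq_getElem _ _ (by simp; omega), List.getD_eq_getElem _ _ h,
      List.getElem_append_left h]

lemma pv_getD_append_len {α : Type} (l : List α) (x d : α) :
    (l ++ [x]).getD l.length d = x := by
  rw [List.getD_eq_getElem _ _ (by simp)]; simp

lemma pv_getD_map_range' {α : Type} (f : Nat → α) (s n t : Nat) (d : α) (h : t < n) :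
    ((List.range' s n).map f).getD t d = f (s + t) := by
  rw [List.getD_eq_getElem _ _ (by simpa using h)]
  simp

lemma pv_cast_emod (a : Int) : ((a % 3 : Int) : ZMod 3) = (a : ZMod 3) := by
  exact (ZMod.intCast_eq_intCast_iff _ _ _).mpr (Int.emod_emod_of_dvd a dvd_rfl)

lemma pv_cast_eq_zero (a : Int) (h : a % 3 = 0) : ((a : Int) : ZMod 3) = 0 := by
  rwa [ZMod.intCast_zmod_eq_zero_iff_dvd, Int.dvd_iff_emod_eq_zero]

lemma pv_zmod3_inj (a b : Int) (ha0 : 0 ≤ a) (ha1 : a < 3) (hb0 : 0 ≤ b) (hb1 : b < 3)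
    (h : ((a : Int) : ZMod 3) = ((b : Int) : ZMod 3)) : a = b := by
  have := (ZMod.intCast_eq_intCast_iff a b 3).mp h
  unfold Int.ModEq at this
  omega

lemma pv_getD_mem' (m : List (List Int)) (row : List Int) (h : row ∈ m) :
    ∃ r, r < m.length ∧ row = m.getD r [] := by
  obtain ⟨r, hr, he⟩ := List.mem_iff_getElem.mp h
  exact ⟨r, hr, by rw [List.getD_eq_getElem _ _ hr, he]⟩

-- each row of the result of the elimination fold, in terms of the INITIAL state
lemma pvElim_point (n_cols rank col : Nat) : ∀ (rs : List Nat) (m : List (List Int)) (b : List Int),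
    rs.Nodup →
    (rs.foldl (pvStepA n_cols rank col) (m, b)).1.length = m.length
    ∧ (rs.foldl (pvStepA n_cols rank col) (m, b)).2.length = b.length
    ∧ (∀ r, (r ∉ rs ∨ r = rank) →
        (rs.foldl (pvStepA n_cols rank col) (m, b)).1.getD r [] = m.getD r []
        ∧ (rs.foldl (pvStepA n_cols rank col) (m, b)).2.getD r 0 = b.getD r 0)
    ∧ (∀ r ∈ rs, r ≠ rank → r < m.length → r < b.length →
        (if ((m.getD r []).getD col 0) % 3 ≠ 0 then
           (rs.foldl (pvStepA n_cols rank col) (m, b)).1.getD r []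
              = (List.range n_cols).map (fun c =>
                  ((m.getD r []).getD c 0 - (((m.getD r []).getD col 0) % 3) * ((m.getD rank []).getD c 0)) % 3)
           ∧ (rs.foldl (pvStepA n_cols rank col) (m, b)).2.getD r 0
              = (b.getD r 0 - (((m.getD r []).getD col 0) % 3) * b.getD rank 0) % 3
         else (rs.foldl (pvStepA n_cols rank col) (m, b)).1.getD r [] = m.getD r []
           ∧ (rs.foldl (pvStepA n_cols rank col) (m, b)).2.getD r 0 = b.getD r 0))
  | [], m, b, _ => by
      refine ⟨rfl, rfl, fun r _ => ⟨rfl, rfl⟩, ?_⟩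
      intro r hr; cases hr
  | r0 :: rs, m, b, hnd => by
      have hr0 : r0 ∉ rs := (List.nodup_cons.mp hnd).1
      have hnd' : rs.Nodup := (List.nodup_cons.mp hnd).2
      by_cases hrk : r0 = rank
      · -- the step at r0 = rank is the identity
        have hid : pvStepA n_cols rank col (m, b) r0 = (m, b) := by
          simp [pvStepA, hrk]
        obtain ⟨h1, h2, h3, h4⟩ := pvElim_point n_cols rank col rs m b hnd'
        rw [List.foldl_cons, hid]
        refine ⟨h1, h2, ?_, ?_⟩
        · intro r hr
          rcases hr with hr | hr
          · exact h3 r (Or.inl (fun hm => hr (List.mem_cons_of_mem _ hm)))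
          · exact h3 r (Or.inr hr)
        · intro r hr hrrk hrm hrb
          rcases List.mem_cons.mp hr with rfl | hr
          · exact absurd hrk hrrk
          · exact h4 r hr hrrk hrm hrb
      · -- the step really updates row r0 (if its factor is nonzero)
        rw [List.foldl_cons]
        by_cases hf : ((m.getD r0 []).getD col 0) % 3 ≠ 0
        · have hstep : pvStepA n_cols rank col (m, b) r0
              = (m.set r0 ((List.range n_cols).map (fun c =>
                  ((m.getD r0 []).getD c 0 - (((m.getD r0 []).getD col 0) % 3) * ((m.getD rank []).getD c 0)) % 3)),
                 b.set r0 ((b.getD r0 0 - (((m.getD r0 []).getD col 0) % 3) * b.getD rank 0) % 3)) := by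
            simp only [pvStepA, if_neg hrk, if_pos hf]
          rw [hstep]
          set m1 := m.set r0 ((List.range n_cols).map (fun c =>
                  ((m.getD r0 []).getD c 0 - (((m.getD r0 []).getD col 0) % 3) * ((m.getD rank []).getD c 0)) % 3)) with hm1
          set b1 := b.set r0 ((b.getD r0 0 - (((m.getD r0 []).getD col 0) % 3) * b.getD rank 0) % 3) with hb1
          obtain ⟨h1, h2, h3, h4⟩ := pvElim_point n_cols rank col rs m1 b1 hnd'
          have hm1ne : ∀ r, r ≠ r0 → m1.getD r [] = m.getD r [] ∧ b1.getD r 0 = b.getD r 0 := by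
            intro r hr
            exact ⟨pv_getD_set_ne _ _ _ _ _ (fun h => hr h.symm),
                   pv_getD_set_ne _ _ _ _ _ (fun h => hr h.symm)⟩
          refine ⟨h1.trans (by simp [hm1]), h2.trans (by simp [hb1]), ?_, ?_⟩
          · intro r hr
            have hrne : r ≠ r0 := by
              rcases hr with hr | hr
              · exact fun h => hr (h ▸ List.mem_cons_self ..)
              · exact fun h => hrk (by omega)
            have hr' : r ∉ rs ∨ r = rank := by
              rcases hr with hr | hr
              · exact Or.inl (fun hm => hr (List.mem_cons_of_mem _ hm))
              · exact Or.inr hr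
            obtain ⟨e1, e2⟩ := h3 r hr'
            exact ⟨e1.trans (hm1ne r hrne).1, e2.trans (hm1ne r hrne).2⟩
          · intro r hr hrrk hrm hrb
            rcases List.mem_cons.mp hr with rfl | hr
            · obtain ⟨e1, e2⟩ := h3 r (Or.inl hr0)
              rw [if_pos hf]
              constructor
              · rw [e1, hm1]; exact pv_getD_set_self _ _ _ _ hrm
              · rw [e2, hb1]; exact pv_getD_set_self _ _ _ _ hrb
            · have hrne : r ≠ r0 := fun h => hr0 (h ▸ hr)
              have hrkne : rank ≠ r0 := fun h => hrk h.symm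
              have := h4 r hr hrrk (by rw [hm1]; simpa using hrm) (by rw [hb1]; simpa using hrb)
              rw [(hm1ne r hrne).1, (hm1ne rank hrkne).1, (hm1ne r hrne).2, (hm1ne rank hrkne).2] at this
              exact this
        · have hstep : pvStepA n_cols rank col (m, b) r0 = (m, b) := by
            simp only [pvStepA, if_neg hrk]
            exact if_neg hf
          rw [hstep]
          obtain ⟨h1, h2, h3, h4⟩ := pvElim_point n_cols rank col rs m b hnd'
          refine ⟨h1, h2, ?_, ?_⟩
          · intro r hr
            rcases hr with hr | hr
            · exact h3 r (Or.inl (fun hm => hr (List.mem_cons_of_mem _ hm)))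
            · exact h3 r (Or.inr hr)
          · intro r hr hrrk hrm hrb
            rcases List.mem_cons.mp hr with rfl | hr
            · rw [if_neg hf]
              exact h3 r (Or.inl hr0)
            · exact h4 r hr hrrk hrm hrb

-- the A-side readout fold, characterized pointwise
lemma pvFoldA_char (b2 : List Int) : ∀ (ps : List Nat) (i0 : Nat) (x : List Int),
    (∀ q ∈ ps, q < x.length) → ps.Nodup →
    ((ps.foldl (fun (st : Nat × List Int) col => (st.1 + 1, st.2.set col (b2.getD st.1 0))) (i0, x)).2).length = x.length
    ∧ ∀ c, ((ps.foldl (fun (st : Nat × List Int) col => (st.1 + 1, st.2.set col (b2.getD st.1 0))) (i0, x)).2).getD c 0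
        = if c ∈ ps then pvLook ps i0 b2 c else x.getD c 0
  | [], i0, x, _, _ => ⟨rfl, fun c => by simp⟩
  | q :: ps, i0, x, hlt, hnd => by
      have hq : q ∉ ps := (List.nodup_cons.mp hnd).1
      rw [List.foldl_cons]
      obtain ⟨h1, h2⟩ := pvFoldA_char b2 ps (i0+1) (x.set q (b2.getD i0 0))
        (fun q' hq' => by simpa using hlt q' (List.mem_cons_of_mem _ hq')) (List.nodup_cons.mp hnd).2
      refine ⟨h1.trans (by simp), ?_⟩
      intro c
      rw [h2 c]
      by_cases hc : c ∈ ps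
      · have hqc : q ≠ c := fun h => hq (h ▸ hc)
        rw [if_pos hc, if_pos (List.mem_cons_of_mem _ hc), pvLook, if_neg hqc]
      · rw [if_neg hc]
        by_cases hcq : c = q
        · subst hcq
          rw [if_pos (List.mem_cons_self ..), pvLook, if_pos rfl,
              pv_getD_set_self _ _ _ _ (hlt c (List.mem_cons_self ..))]
        · rw [if_neg (by simp [hcq, hc]), pv_getD_set_ne _ _ _ _ _ (fun h => hcq h.symm)]

-- sum of a pointwise product as a Finset sum
lemma pv_sum_zip : ∀ (r x : List Int) (n : Nat), r.length = n → x.length = n →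
    (List.zipWith (fun v y => v * y) r x).sum = ∑ c ∈ Finset.range n, r.getD c 0 * x.getD c 0
  | [], x, n, hr, hx => by
      simp at hr
      subst hr
      simp
  | a :: r, [], n, hr, hx => by simp at hr hx; omega
  | a :: r, y :: x, n, hr, hx => by
      cases n with
      | zero => simp at hr
      | succ n =>
        rw [Finset.sum_range_succ']
        simp only [List.getD_cons_succ, List.getD_cons_zero]
        rw [← pv_sum_zip r x n (by simpa using hr) (by simpa using hx)]
        simp [add_comm]

-- pvLook finds exactly the pivot's rhs when the pivot columns are distinct
lemma pvLook_at (b2 : List Int) : ∀ (qs : List Nat) (i0 j : Nat), qs.Nodup → j < qs.length →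
    pvLook qs i0 b2 (qs.getD j 0) = b2.getD (i0 + j) 0
  | [], _, j, _, hj => by simp at hj
  | q :: qs, i0, 0, _, _ => by simp [pvLook]
  | q :: qs, i0, j+1, hnd, hj => by
      have hj' : j < qs.length := by simpa using hj
      have hmem : qs.getD j 0 ∈ qs := by
        rw [List.getD_eq_getElem _ _ hj']; exact List.getElem_mem hj'
      have hne : q ≠ qs.getD j 0 := fun h => (List.nodup_cons.mp hnd).1 (h ▸ hmem)
      rw [List.getD_cons_succ, pvLook, if_neg hne,
          pvLook_at b2 qs (i0+1) j (List.nodup_cons.mp hnd).2 hj']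
      congr 1
      omega

lemma pv_pvP_lt (done : List (Nat × List Int × Int)) (n_cols : Nat)
    (hpivlt : ∀ d ∈ done, d.1 < n_cols) (j : Nat) (hj : j < done.length) :
    pvP done j < n_cols := by
  unfold pvP
  rw [List.getD_eq_getElem _ _ hj]
  exact hpivlt _ (List.getElem_mem hj)

-- the B-side readout fold (back-substitution), characterized pointwise
lemma pvFoldB_char (n_cols : Nat) (done : List (Nat × List Int × Int)) (m : List (List Int)) (b2 : List Int)
    (hpivlt : ∀ d ∈ done, d.1 < n_cols)
    (hpw : (done.map (fun d => d.1)).Pairwise (· < ·))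
    (hrowlen : ∀ d ∈ done, d.2.1.length = n_cols)
    (hmlen : done.length ≤ m.length)
    (hmrows : ∀ row ∈ m, n_cols ≤ row.length)
    (hbnd : ∀ i < done.length, 0 ≤ b2.getD i 0 ∧ b2.getD i 0 < 3)
    (hINV : ∀ i < done.length, ∀ c : Nat, pvJ n_cols m b2 i c
      = pvE done i c - ∑ j ∈ Finset.Ico (i+1) done.length, pvE done i (pvP done j) * pvJ n_cols m b2 j c) :
    ∀ (n i0 : Nat), i0 + n = done.length →
    ((done.drop i0).reverse.foldl (fun (x : List Int) d =>
        x.set d.1 ((d.2.2 - (List.zipWith (fun v y => v * y) d.2.1 x).sum) % 3)) (List.replicate n_cols 0)).length = n_cols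
    ∧ ∀ c, ((done.drop i0).reverse.foldl (fun (x : List Int) d =>
        x.set d.1 ((d.2.2 - (List.zipWith (fun v y => v * y) d.2.1 x).sum) % 3)) (List.replicate n_cols 0)).getD c 0
        = if c ∈ (done.drop i0).map (fun d => d.1)
          then pvLook ((done.drop i0).map (fun d => d.1)) i0 b2 c else 0 := by
  intro n
  induction n with
  | zero =>
      intro i0 h0
      rw [List.drop_of_length_le (by omega)]
      exact ⟨by simp, fun c => by simp⟩
  | succ n ih =>
      intro i0 h0
      have hi0 : i0 < done.length := by omega
      have hdrop : done.drop i0 = done[i0] :: done.drop (i0+1) := List.drop_eq_getElem_cons hi0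
      obtain ⟨hxlen, hxc⟩ := ih (i0+1) (by omega)
      set d := done[i0] with hd
      set x' := ((done.drop (i0+1)).reverse.foldl (fun (x : List Int) d =>
        x.set d.1 ((d.2.2 - (List.zipWith (fun v y => v * y) d.2.1 x).sum) % 3)) (List.replicate n_cols 0)) with hx'
      have hdmem : d ∈ done := List.getElem_mem hi0
      have hdrowlen : d.2.1.length = n_cols := hrowlen d hdmem
      have hdplt : d.1 < n_cols := hpivlt d hdmem
      have hgetDi0 : done.getD i0 (0, [], 0) = d := List.getD_eq_getElem _ _ hi0
      have hcols' : (done.drop (i0+1)).map (fun d => d.1) = (done.map (fun d => d.1)).drop (i0+1) :=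
        List.map_drop
      have hcolsnd : ((done.drop (i0+1)).map (fun d => d.1)).Nodup := by
        rw [hcols']
        exact ((hpw.sublist (List.drop_sublist ..)).imp Nat.ne_of_lt)
      -- entry c of cols-after-i0, globally
      have hcols_getD : ∀ j, i0 + 1 ≤ j → j < done.length →
          ((done.drop (i0+1)).map (fun d => d.1)).getD (j - (i0+1)) 0 = pvP done j := by
        intro j hj1 hj2
        rw [List.getD_eq_getElem _ _ (by simp; omega)]
        simp only [List.getElem_map, List.getElem_drop]
        unfold pvP
        rw [List.getD_eq_getElem _ _ (by omega)]
        congr 2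
        omega
      have hmemcols : ∀ j, i0 + 1 ≤ j → j < done.length →
          pvP done j ∈ (done.drop (i0+1)).map (fun d => d.1) := by
        intro j hj1 hj2
        rw [← hcols_getD j hj1 hj2, List.getD_eq_getElem _ _ (by simp; omega)]
        exact List.getElem_mem _
      -- the dot product, cast to ZMod 3
      have hsum : (((List.zipWith (fun v y => v * y) d.2.1 x').sum : Int) : ZMod 3)
          = ∑ j ∈ Finset.Ico (i0+1) done.length,
              pvE done i0 (pvP done j) * ((b2.getD j 0 : Int) : ZMod 3) := by
        rw [pv_sum_zip d.2.1 x' n_cols hdrowlen hxlen]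
        push_cast
        have hTsub : (Finset.Ico (i0+1) done.length).image (pvP done) ⊆ Finset.range n_cols := by
          intro c hc
          obtain ⟨j, hj, rfl⟩ := Finset.mem_image.mp hc
          exact Finset.mem_range.mpr (pv_pvP_lt done n_cols hpivlt j (Finset.mem_Ico.mp hj).2)
        have hzero : ∀ c ∈ Finset.range n_cols,
            c ∉ (Finset.Ico (i0+1) done.length).image (pvP done) →
            ((d.2.1.getD c 0 : Int) : ZMod 3) * ((x'.getD c 0 : Int) : ZMod 3) = 0 := by
          intro c _ hcT
          have hnotmem : c ∉ (done.drop (i0+1)).map (fun d => d.1) := by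
            intro hmem
            obtain ⟨d', hd', he⟩ := List.mem_map.mp hmem
            obtain ⟨t, ht, rfl⟩ := List.mem_iff_getElem.mp hd'
            have htlen : i0 + 1 + t < done.length := by simp at ht; omega
            refine hcT (Finset.mem_image.mpr ⟨i0 + 1 + t, Finset.mem_Ico.mpr ⟨by omega, htlen⟩, ?_⟩)
            unfold pvP
            rw [List.getD_eq_getElem _ _ htlen, ← he]
            simp
          rw [hxc c, if_neg hnotmem]
          simp
        rw [← Finset.sum_subset hTsub hzero]
        have hinj : ∀ j1 ∈ Finset.Ico (i0+1) done.length, ∀ j2 ∈ Finset.Ico (i0+1) done.length,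
            pvP done j1 = pvP done j2 → j1 = j2 := by
          intro j1 hj1 j2 hj2 he
          have h1 := Finset.mem_Ico.mp hj1
          have h2 := Finset.mem_Ico.mp hj2
          have hmono : ∀ a b2', a < done.length → b2' < done.length → a < b2' →
              pvP done a < pvP done b2' := by
            intro a b2' ha hb hab
            have := List.pairwise_iff_getElem.mp hpw a b2' (by simpa using ha) (by simpa using hb) hab
            unfold pvP
            rw [List.getD_eq_getElem _ _ ha, List.getD_eq_getElem _ _ hb]
            simpa using this
          rcases lt_trichotomy j1 j2 with h | h | h
          · exact absurd he (Nat.ne_of_lt (hmono j1 j2 h1.2 h2.2 h))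
          · exact h
          · exact absurd he.symm (Nat.ne_of_lt (hmono j2 j1 h2.2 h1.2 h))
        rw [Finset.sum_image hinj]
        apply Finset.sum_congr rfl
        intro j hj
        have hj1 := (Finset.mem_Ico.mp hj).1
        have hj2 := (Finset.mem_Ico.mp hj).2
        have hx'v : x'.getD (pvP done j) 0 = b2.getD j 0 := by
          rw [hxc (pvP done j), if_pos (hmemcols j hj1 hj2), ← hcols_getD j hj1 hj2,
              pvLook_at b2 _ (i0+1) (j - (i0+1)) hcolsnd (by simp; omega)]
          congr 1
          omega
        rw [hx'v]
        congr 1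
        unfold pvE
        rw [hgetDi0, pv_getD_append_lt _ _ _ _ (by rw [hdrowlen]; exact pv_pvP_lt done n_cols hpivlt j hj2)]
      -- the back-substituted value is exactly the Jordan rhs
      have hval : (d.2.2 - (List.zipWith (fun v y => v * y) d.2.1 x').sum) % 3 = b2.getD i0 0 := by
        apply pv_zmod3_inj _ _ (Int.emod_nonneg _ (by norm_num)) (Int.emod_lt_of_pos _ (by norm_num))
          (hbnd i0 hi0).1 (hbnd i0 hi0).2
        rw [pv_cast_emod, Int.cast_sub, hsum]
        have hINV0 := hINV i0 hi0 n_cols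
        have hJn : ∀ j, j < done.length → pvJ n_cols m b2 j n_cols = ((b2.getD j 0 : Int) : ZMod 3) := by
          intro j hj
          unfold pvJ
          rw [pvRow_getD_last _ _ _ (hmrows _ (pv_getD_mem m j (by omega)))]
        have hEn : pvE done i0 n_cols = ((d.2.2 : Int) : ZMod 3) := by
          unfold pvE
          rw [hgetDi0, ← hdrowlen, pv_getD_append_len]
        have hs : ∑ j ∈ Finset.Ico (i0+1) done.length, pvE done i0 (pvP done j) * pvJ n_cols m b2 j n_cols
            = ∑ j ∈ Finset.Ico (i0+1) done.length, pvE done i0 (pvP done j) * ((b2.getD j 0 : Int) : ZMod 3) :=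
          Finset.sum_congr rfl (fun j hj => by rw [hJn j (Finset.mem_Ico.mp hj).2])
        rw [hJn i0 hi0, hEn, hs] at hINV0
        rw [← hINV0]
      -- assemble
      rw [hdrop]
      simp only [List.reverse_cons, List.foldl_append, List.foldl_cons, List.foldl_nil, List.map_cons]
      rw [← hx', hval]
      refine ⟨by simpa using hxlen, ?_⟩
      intro c
      by_cases hc : c = d.1
      · subst hc
        rw [pv_getD_set_self _ _ _ _ (by rw [hxlen]; exact hdplt),
            if_pos (List.mem_cons_self ..), pvLook, if_pos rfl]
      · rw [pv_getD_set_ne _ _ _ _ _ (fun h => hc h.symm), hxc c]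
        by_cases hc2 : c ∈ (done.drop (i0+1)).map (fun d => d.1)
        · rw [if_pos hc2, if_pos (List.mem_cons_of_mem _ hc2), pvLook,
              if_neg (fun h => hc h.symm)]
        · rw [if_neg hc2, if_neg (fun hmem => (List.mem_cons.mp hmem).elim (fun h => hc h) hc2)]

-- B's enumerate-based pivot search over the worklist = A's index search, shifted
lemma pv_find_corr (g : Nat → List Int × Int) (col : Nat) : ∀ (L s k : Nat),
    ((((List.range' s L).map g).zipIdx k).find? (fun t => t.1.1.getD col 0 % 3 != 0)).map Prod.snd
    = ((List.range' s L).find? (fun r => (g r).1.getD col 0 % 3 != 0)).map (fun r => r - s + k)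
  | 0, s, k => rfl
  | L+1, s, k => by
      rw [List.range'_succ, List.map_cons, List.zipIdx_cons, List.find?_cons, List.find?_cons]
      by_cases hp : ((g s).1.getD col 0 % 3 != 0) = true
      · simp only [hp]
        simp
      · simp only [Bool.not_eq_true] at hp
        simp only [hp]
        rw [pv_find_corr g col L (s+1) (k+1)]
        cases hf : (List.range' (s+1) L).find? (fun r => (g r).1.getD col 0 % 3 != 0) with
        | none => rfl
        | some r =>
            have hmem := List.mem_of_find?_eq_some hf
            have hr := List.mem_range'_1.mp hmem
            simp only [Option.map_some]
            congr 1
            omega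

-- splitting a range' at an offset
lemma pv_range'_split : ∀ (t s n : Nat), t ≤ n →
    List.range' s n = List.range' s t ++ List.range' (s+t) (n-t)
  | 0, s, n, _ => by simp
  | t+1, s, n, h => by
      cases n with
      | zero => omega
      | succ n =>
          rw [List.range'_succ, List.range'_succ, List.cons_append,
              pv_range'_split t (s+1) n (by omega)]
          have h1 : s + 1 + t = s + (t + 1) := by omega
          have h2 : n - t = n + 1 - (t + 1) := by omega
          rw [h1, h2]

-- the worklist after extracting the pivot = A's swapped matrix rows below rank+1
lemma pv_rest_eq (m : List (List Int)) (b : List Int) (n_rows n_cols rank piv : Nat)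
    (hm : m.length = n_rows) (hb : n_rows ≤ b.length) (hrk : rank ≤ piv) (hpv : piv < n_rows) :
    (if piv - rank = 0 then
        ((List.range' rank (n_rows - rank)).map (fun i => ((m.getD i []).take n_cols, b.getD i 0))).drop 1
     else (((List.range' rank (n_rows - rank)).map (fun i => ((m.getD i []).take n_cols, b.getD i 0))).drop 1).take (piv - rank - 1)
          ++ [((List.range' rank (n_rows - rank)).map (fun i => ((m.getD i []).take n_cols, b.getD i 0))).getD 0 ([], 0)]
          ++ ((List.range' rank (n_rows - rank)).map (fun i => ((m.getD i []).take n_cols, b.getD i 0))).drop (piv - rank + 1))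
    = (List.range' (rank+1) (n_rows - (rank+1))).map (fun i =>
        ((((m.set rank (m.getD piv [])).set piv (m.getD rank [])).getD i []).take n_cols,
         (((b.set rank (b.getD piv 0)).set piv (b.getD rank 0)).getD i 0))) := by
  have hrankm : rank < m.length := by omega
  have hpivm : piv < m.length := by omega
  have hrankb : rank < b.length := by omega
  have hpivb : piv < b.length := by omega
  have hm1 : ∀ i, i ≠ rank → i ≠ piv →
      ((m.set rank (m.getD piv [])).set piv (m.getD rank [])).getD i [] = m.getD i []
      ∧ ((b.set rank (b.getD piv 0)).set piv (b.getD rank 0)).getD i 0 = b.getD i 0 := by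
    intro i h1 h2
    rw [pv_getD_set_ne _ _ _ _ _ (fun h => h2 h.symm), pv_getD_set_ne _ _ _ _ _ (fun h => h1 h.symm),
        pv_getD_set_ne _ _ _ _ _ (fun h => h2 h.symm), pv_getD_set_ne _ _ _ _ _ (fun h => h1 h.symm)]
    exact ⟨rfl, rfl⟩
  have hm1piv : ((m.set rank (m.getD piv [])).set piv (m.getD rank [])).getD piv [] = m.getD rank []
      ∧ ((b.set rank (b.getD piv 0)).set piv (b.getD rank 0)).getD piv 0 = b.getD rank 0 := by
    rw [pv_getD_set_self _ _ _ _ (by simpa using hpivm), pv_getD_set_self _ _ _ _ (by simpa using hpivb)]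
    exact ⟨rfl, rfl⟩
  have hgg1 : ∀ i, i ≠ rank → i ≠ piv →
      (fun i => ((m.getD i []).take n_cols, b.getD i 0)) i
      = (fun i => ((((m.set rank (m.getD piv [])).set piv (m.getD rank [])).getD i []).take n_cols,
         (((b.set rank (b.getD piv 0)).set piv (b.getD rank 0)).getD i 0))) i := by
    intro i h1 h2
    simp only []
    rw [(hm1 i h1 h2).1, (hm1 i h1 h2).2]
  have hdrop1 : ((List.range' rank (n_rows - rank)).map (fun i => ((m.getD i []).take n_cols, b.getD i 0))).drop 1
      = (List.range' (rank+1) (n_rows - (rank+1))).map (fun i => ((m.getD i []).take n_cols, b.getD i 0)) := by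
    have h' : n_rows - rank = (n_rows - (rank+1)) + 1 := by omega
    rw [h', List.range'_succ, List.map_cons, List.drop_succ_cons, List.drop_zero]
  by_cases hp : piv - rank = 0
  · rw [if_pos hp, hdrop1]
    apply List.map_congr_left
    intro i hi
    have hib := List.mem_range'_1.mp hi
    exact hgg1 i (by omega) (by omega)
  · rw [if_neg hp]
    have hppos : 1 ≤ piv - rank := by omega
    have hy : ((List.range' rank (n_rows - rank)).map (fun i => ((m.getD i []).take n_cols, b.getD i 0))).getD 0 ([], 0)
        = (fun i => ((m.getD i []).take n_cols, b.getD i 0)) rank := by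
      have := pv_getD_map_range' (fun i => ((m.getD i []).take n_cols, b.getD i 0)) rank (n_rows - rank) 0 ([], 0) (by omega)
      simpa using this
    have hsplit1 : List.range' (rank+1) (n_rows - (rank+1))
        = List.range' (rank+1) (piv - rank - 1) ++ List.range' piv (n_rows - piv) := by
      have h := pv_range'_split (piv - rank - 1) (rank+1) (n_rows - (rank+1)) (by omega)
      rw [show rank + 1 + (piv - rank - 1) = piv from by omega,
          show n_rows - (rank+1) - (piv - rank - 1) = n_rows - piv from by omega] at h
      exact h
    have hsplit0 : List.range' rank (n_rows - rank)
        = List.range' rank (piv - rank + 1) ++ List.range' (piv+1) (n_rows - (piv+1)) := by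
      have h := pv_range'_split (piv - rank + 1) rank (n_rows - rank) (by omega)
      rw [show rank + (piv - rank + 1) = piv + 1 from by omega,
          show n_rows - rank - (piv - rank + 1) = n_rows - (piv+1) from by omega] at h
      exact h
    have hsplit2 : List.range' piv (n_rows - piv) = piv :: List.range' (piv+1) (n_rows - (piv+1)) := by
      have h' : n_rows - piv = (n_rows - (piv+1)) + 1 := by omega
      rw [h', List.range'_succ]
    have htake : (((List.range' rank (n_rows - rank)).map (fun i => ((m.getD i []).take n_cols, b.getD i 0))).drop 1).take (piv - rank - 1)
        = (List.range' (rank+1) (piv - rank - 1)).map (fun i => ((m.getD i []).take n_cols, b.getD i 0)) := by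
      rw [hdrop1, hsplit1, List.map_append, List.take_left' (by simp)]
    have hdropP : ((List.range' rank (n_rows - rank)).map (fun i => ((m.getD i []).take n_cols, b.getD i 0))).drop (piv - rank + 1)
        = (List.range' (piv+1) (n_rows - (piv+1))).map (fun i => ((m.getD i []).take n_cols, b.getD i 0)) := by
      rw [hsplit0, List.map_append, List.drop_left' (by simp)]
    rw [htake, hy, hdropP, hsplit1, hsplit2, List.map_append, List.map_cons]
    have hr1 := List.map_congr_left (l := List.range' (rank+1) (piv - rank - 1))
      (f := fun i => ((m.getD i []).take n_cols, b.getD i 0))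
      (g := fun i => ((((m.set rank (m.getD piv [])).set piv (m.getD rank [])).getD i []).take n_cols,
         (((b.set rank (b.getD piv 0)).set piv (b.getD rank 0)).getD i 0)))
      (fun i hi => by
        have hib := List.mem_range'_1.mp hi
        exact hgg1 i (by omega) (by omega))
    have hr2 := List.map_congr_left (l := List.range' (piv+1) (n_rows - (piv+1)))
      (f := fun i => ((m.getD i []).take n_cols, b.getD i 0))
      (g := fun i => ((((m.set rank (m.getD piv [])).set piv (m.getD rank [])).getD i []).take n_cols,
         (((b.set rank (b.getD piv 0)).set piv (b.getD rank 0)).getD i 0)))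
      (fun i hi => by
        have hib := List.mem_range'_1.mp hi
        exact hgg1 i (by omega) (by omega))
    have hmid : (fun i => ((m.getD i []).take n_cols, b.getD i 0)) rank
        = (fun i => ((((m.set rank (m.getD piv [])).set piv (m.getD rank [])).getD i []).take n_cols,
         (((b.set rank (b.getD piv 0)).set piv (b.getD rank 0)).getD i 0))) piv := by
      simp only []
      rw [hm1piv.1, hm1piv.2]
    rw [hr1, hr2, hmid]
    simp [List.append_assoc]

-- getD of a mapped range
lemma pv_getD_map_range (f : Nat → Int) (n c : Nat) (h : c < n) :
    ((List.range n).map f).getD c 0 = f c := by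
  rw [List.range_eq_range']
  simpa using pv_getD_map_range' f 0 n c 0 h

-- the main parallel-loop simulation
lemma pvLoop_corr (n_rows n_cols blen : Nat) :
    ∀ (k col : Nat) (m : List (List Int)) (b : List Int) (rank : Nat) (pivots : List Nat)
      (done : List (Nat × List Int × Int)) (todo : List (List Int × Int)),
      col + k = n_cols →
      pvRel n_rows n_cols blen col m b rank pivots done todo →
      pvRel n_rows n_cols blen n_cols
        (pvRowReduceLoop n_rows n_cols k m b rank col pivots).2.1
        (pvRowReduceLoop n_rows n_cols k m b rank col pivots).2.2.1
        (pvRowReduceLoop n_rows n_cols k m b rank col pivots).1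
        (pvRowReduceLoop n_rows n_cols k m b rank col pivots).2.2.2
        (pvForward n_cols (List.range' col k) done todo).1
        (pvForward n_cols (List.range' col k) done todo).2 := by
  intro k
  induction k with
  | zero =>
      intro col m b rank pivots done todo hcol hrel
      have hc : col = n_cols := by omega
      subst hc
      exact hrel
  | succ k ih =>
      intro col m b rank pivots done todo hcol hrel
      obtain ⟨h1, h2, h3, h4, h5, h6, h7, h8, h9, h10, h11, h12, h13⟩ := hrel
      by_cases hrkn : rank < n_rows
      · have hcoln : col < n_cols := by omega
        have htlen : todo.length = n_rows - rank := by rw [h11]; simp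
        have htne : todo ≠ [] := by
          intro hnil
          rw [hnil] at htlen
          simp at htlen
          omega
        have hpredeq : ∀ r ∈ List.range' rank (n_rows - rank),
            ((((fun i => ((m.getD i []).take n_cols, b.getD i 0)) r).1.getD col 0 % 3 != 0) : Bool)
              = (((m.getD r []).getD col 0 % 3 != 0) : Bool) := by
          intro r hr
          simp only []
          rw [pv_getD_take _ _ _ _ hcoln]
        have hfindB : ((todo.zipIdx.find? (fun t => t.1.1.getD col 0 % 3 != 0)).map Prod.snd)
            = ((List.range' rank (n_rows - rank)).find? (fun r => (m.getD r []).getD col 0 % 3 != 0)).map (fun r => r - rank) := by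
          rw [h11, pv_find_corr, pv_find?_congr _ _ _ hpredeq]
          cases hf : (List.range' rank (n_rows - rank)).find? (fun r => (m.getD r []).getD col 0 % 3 != 0) with
          | none => rfl
          | some r => simp
        have hfindA := pvFindPivot_eq m col (List.range' rank (n_rows - rank))
        rw [pvRowReduceLoop, if_pos (show rank < n_rows ∧ col < n_cols from ⟨hrkn, hcoln⟩),
            List.range'_succ, pvForward, if_neg htne]
        cases hfind : (List.range' rank (n_rows - rank)).find? (fun r => (m.getD r []).getD col 0 % 3 != 0) with
        | none =>
            rw [hfindA, hfind, show ((todo.zipIdx.find? (fun t => t.1.1.getD col 0 % 3 != 0)).map Prod.snd) = none from by rw [hfindB, hfind]; rfl]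
            exact ih (col+1) m b rank pivots done todo (by omega)
              ⟨h1, h2, h3, h4, h5, h6, h7, h8, fun q hq => by have := h9 q hq; omega, h10, h11, h12, h13⟩
        | some piv =>
            have hpmem := List.mem_of_find?_eq_some hfind
            have hpb := List.mem_range'_1.mp hpmem
            have hpivlt : piv < n_rows := by omega
            have hple : rank ≤ piv := hpb.1
            rw [hfindA, hfind, show ((todo.zipIdx.find? (fun t => t.1.1.getD col 0 % 3 != 0)).map Prod.snd) = some (piv - rank) from by rw [hfindB, hfind]; rfl]
            -- names for both sides' new states (exactly the ports' let-bodies)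
            set prow0 : List Int := (todo.getD (piv - rank) ([], 0)).1 with hprow0d
            set prhs0 : Int := (todo.getD (piv - rank) ([], 0)).2 with hprhs0d
            set invB : Int := if prow0.getD col 0 = 1 then 1 else 2 with hinvBd
            set prow : List Int := prow0.map (fun v => (invB * v) % 3) with hprowd
            set prhs : Int := (invB * prhs0) % 3 with hprhsd
            set rest : List (List Int × Int) :=
              if piv - rank = 0 then todo.drop 1
              else (todo.drop 1).take (piv - rank - 1) ++ [todo.getD 0 ([], 0)] ++ todo.drop (piv - rank + 1) with hrestd
            set m1 : List (List Int) := (m.set rank (m.getD piv [])).set piv (m.getD rank []) with hm1d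
            set b1 : List Int := (b.set rank (b.getD piv 0)).set piv (b.getD rank 0) with hb1d
            set invA : Int := if (m1.getD rank []).getD col 0 = 1 then 1 else 2 with hinvAd
            set m2 : List (List Int) := m1.set rank ((m1.getD rank []).map (fun x => (invA * x) % 3)) with hm2d
            set b2v : List Int := b1.set rank ((invA * (b1.getD rank 0)) % 3) with hb2d
            -- basic index facts
            have hrankm : rank < m.length := by omega
            have hpivm : piv < m.length := by omega
            have hrankb : rank < b.length := by omega
            have hpivb : piv < b.length := by omega
            have htodoD : todo.getD (piv - rank) ([], 0) = ((m.getD piv []).take n_cols, b.getD piv 0) := by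
              rw [h11, pv_getD_map_range' _ _ _ _ _ (by omega)]
              have : rank + (piv - rank) = piv := by omega
              rw [this]
            -- the swapped state, rowwise
            have hm1rank : m1.getD rank [] = m.getD piv [] := by
              by_cases hpr : piv = rank
              · subst hpr
                rw [hm1d, pv_getD_set_self _ _ _ _ (by simpa using hpivm)]
              · rw [hm1d, pv_getD_set_ne _ _ _ _ _ (fun h => hpr h),
                    pv_getD_set_self _ _ _ _ hrankm]
            have hb1rank : b1.getD rank 0 = b.getD piv 0 := by
              by_cases hpr : piv = rank
              · subst hpr
                rw [hb1d, pv_getD_set_self _ _ _ _ (by simpa using hpivb)]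
              · rw [hb1d, pv_getD_set_ne _ _ _ _ _ (fun h => hpr h),
                    pv_getD_set_self _ _ _ _ hrankb]
            have hm1other : ∀ i, i ≠ rank → i ≠ piv → m1.getD i [] = m.getD i [] := by
              intro i hir hip
              rw [hm1d, pv_getD_set_ne _ _ _ _ _ (fun h => hip h.symm),
                  pv_getD_set_ne _ _ _ _ _ (fun h => hir h.symm)]
            have hb1other : ∀ i, i ≠ rank → i ≠ piv → b1.getD i 0 = b.getD i 0 := by
              intro i hir hip
              rw [hb1d, pv_getD_set_ne _ _ _ _ _ (fun h => hip h.symm),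
                  pv_getD_set_ne _ _ _ _ _ (fun h => hir h.symm)]
            have hm1len : m1.length = n_rows := by rw [hm1d]; simp [h1]
            have hb1len : b1.length = b.length := by rw [hb1d]; simp
            have hm1rows : ∀ row ∈ m1, n_cols ≤ row.length := by
              intro row hrow
              rw [hm1d] at hrow
              rcases List.mem_or_eq_of_mem_set hrow with hrow | hrow
              · rcases List.mem_or_eq_of_mem_set hrow with hrow | hrow
                · exact h4 _ hrow
                · subst hrow; exact h4 _ (pv_getD_mem m piv hpivm)
              · subst hrow; exact h4 _ (pv_getD_mem m rank hrankm)
            -- the normalized state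
            have hinveq : prow0.getD col 0 = (m1.getD rank []).getD col 0 := by
              rw [hprow0d, htodoD, hm1rank]
              exact pv_getD_take _ _ _ _ hcoln
            have hinvBA : invB = invA := by rw [hinvBd, hinvAd, hinveq]
            have hm2rank : m2.getD rank [] = (m1.getD rank []).map (fun x => (invA * x) % 3) := by
              rw [hm2d]
              exact pv_getD_set_self _ _ _ _ (by omega)
            have hb2rank : b2v.getD rank 0 = (invA * (b1.getD rank 0)) % 3 := by
              rw [hb2d]
              exact pv_getD_set_self _ _ _ _ (by omega)
            have hm2other : ∀ i, i ≠ rank → m2.getD i [] = m1.getD i [] := by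
              intro i hir
              rw [hm2d, pv_getD_set_ne _ _ _ _ _ (fun h => hir h.symm)]
            have hb2other : ∀ i, i ≠ rank → b2v.getD i 0 = b1.getD i 0 := by
              intro i hir
              rw [hb2d, pv_getD_set_ne _ _ _ _ _ (fun h => hir h.symm)]
            have hm2len : m2.length = n_rows := by rw [hm2d]; simpa using hm1len
            have hb2len : b2v.length = blen := by rw [hb2d]; simpa [hb1len] using h2
            have hm2rows : ∀ row ∈ m2, n_cols ≤ row.length := by
              intro row hrow
              rw [hm2d] at hrow
              rcases List.mem_or_eq_of_mem_set hrow with hrow | hrow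
              · exact hm1rows _ hrow
              · subst hrow
                simpa using hm1rows _ (pv_getD_mem m1 rank (by omega))
            have hm2rowsD : ∀ i, i < n_rows → n_cols ≤ (m2.getD i []).length :=
              fun i hi => hm2rows _ (pv_getD_mem m2 i (by omega))
            have hprowval : prow = (m2.getD rank []).take n_cols := by
              rw [hprowd, hprow0d, htodoD, hm2rank, hm1rank, hinvBA]
              simp only []
              rw [← List.map_take]
            have hprowlen : prow.length = n_cols := by
              rw [hprowval, List.length_take]
              exact Nat.min_eq_left (hm2rowsD rank (by omega))
            have hprhsval : prhs = b2v.getD rank 0 := by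
              rw [hprhsd, hprhs0d, htodoD, hb2rank, hb1rank, hinvBA]
            -- the eliminated state
            obtain ⟨hm3len, hb3len, hunch, hrow3⟩ :=
              pvElim_point n_cols rank col (List.range n_rows) m2 b2v List.nodup_range
            rw [← pvElimRows_eq_foldl] at hm3len hb3len hunch hrow3
            set m3 : List (List Int) := (pvElimRows n_rows n_cols rank col (m2, b2v)).1 with hm3d
            set b3 : List Int := (pvElimRows n_rows n_cols rank col (m2, b2v)).2 with hb3d
            set doneB : List (Nat × List Int × Int) := done ++ [(col, prow, prhs)] with hdoneBd
            have hdoneBrank : doneB.getD rank (0, [], 0) = (col, prow, prhs) := by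
              rw [hdoneBd, h6]
              exact pv_getD_append_len _ _ _
            have hPrank : pvP doneB rank = col := by unfold pvP; rw [hdoneBrank]
            have hErank : ∀ c, pvE doneB rank c = (((prow ++ [prhs]).getD c 0 : Int) : ZMod 3) := by
              intro c
              unfold pvE
              rw [hdoneBrank]
            -- R11: the new worklist
            have hrestmap : rest = (List.range' (rank+1) (n_rows - (rank+1))).map (fun i =>
                ((m1.getD i []).take n_cols, b1.getD i 0)) := by
              rw [hrestd, h11]
              exact pv_rest_eq m b n_rows n_cols rank piv h1 (by omega) hple hpivlt
            have hR11 : rest.map (pvReduceRow col prow prhs)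
                = (List.range' (rank+1) (n_rows - (rank+1))).map (fun i =>
                    ((m3.getD i []).take n_cols, b3.getD i 0)) := by
              rw [hrestmap, List.map_map]
              apply List.map_congr_left
              intro i hi
              have hib := List.mem_range'_1.mp hi
              have hirank : i ≠ rank := by omega
              have hilt : i < n_rows := by omega
              have hff : ((m2.getD i []).take n_cols).getD col 0 % 3 = (m2.getD i []).getD col 0 % 3 := by
                rw [pv_getD_take _ _ _ _ hcoln]
              have hr3 := hrow3 i (List.mem_range.mpr hilt) hirank (by omega) (by omega)
              show pvReduceRow col prow prhs ((m1.getD i []).take n_cols, b1.getD i 0)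
                  = ((m3.getD i []).take n_cols, b3.getD i 0)
              rw [← hm2other i hirank, ← hb2other i hirank]
              by_cases hfz : (m2.getD i []).getD col 0 % 3 = 0
              · rw [if_neg (not_not_intro hfz)] at hr3
                unfold pvReduceRow
                simp only []
                rw [hff, if_pos hfz, hr3.1, hr3.2]
              · rw [if_pos hfz] at hr3
                unfold pvReduceRow
                simp only []
                rw [hff, if_neg hfz, hprowval, hprhsval,
                    pv_zipWith_take _ _ _ _ (hm2rowsD i hilt) (hm2rowsD rank (by omega)),
                    hr3.1, hr3.2, List.take_of_length_le (by simp)]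
            -- R4: all rows of the eliminated matrix still have ≥ n_cols entries
            have hR4 : ∀ row ∈ m3, n_cols ≤ row.length := by
              intro row hrow
              obtain ⟨r, hr, rfl⟩ := pv_getD_mem' m3 row hrow
              have hrn : r < n_rows := by
                have := hm3len
                omega
              by_cases hrr : r = rank
              · rw [hrr, (hunch rank (Or.inr rfl)).1, hm2rank]
                simpa using hm1rows _ (pv_getD_mem m1 rank (by omega))
              · have hr3 := hrow3 r (List.mem_range.mpr hrn) hrr (by omega) (by omega)
                by_cases hfz : (m2.getD r []).getD col 0 % 3 = 0
                · rw [if_neg (not_not_intro hfz)] at hr3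
                  rw [hr3.1]
                  exact hm2rowsD r hrn
                · rw [if_pos hfz] at hr3
                  rw [hr3.1]
                  simp
            -- R12: rhs bounds for the finished rows
            have hR12 : ∀ i, i < rank + 1 → 0 ≤ b3.getD i 0 ∧ b3.getD i 0 < 3 := by
              intro i hi
              by_cases hir : i = rank
              · rw [hir, (hunch rank (Or.inr rfl)).2, hb2rank]
                exact ⟨Int.emod_nonneg _ (by norm_num), Int.emod_lt_of_pos _ (by norm_num)⟩
              · have hilt : i < rank := by omega
                have hr3 := hrow3 i (List.mem_range.mpr (by omega)) hir (by omega) (by omega)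
                by_cases hfz : (m2.getD i []).getD col 0 % 3 = 0
                · rw [if_neg (not_not_intro hfz)] at hr3
                  rw [hr3.2, hb2other i hir, hb1other i hir (by omega)]
                  exact h12 i hilt
                · rw [if_pos hfz] at hr3
                  rw [hr3.2]
                  exact ⟨Int.emod_nonneg _ (by norm_num), Int.emod_lt_of_pos _ (by norm_num)⟩
            -- R13: the Jordan-vs-echelon invariant, via the abstract step lemma
            have hJ2 : ∀ j, j < rank → ∀ c, pvJ n_cols m2 b2v j c = pvJ n_cols m b j c := by
              intro j hj c
              unfold pvJ
              rw [hm2other j (by omega), hb2other j (by omega),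
                  hm1other j (by omega) (by omega), hb1other j (by omega) (by omega)]
            have hE2 : ∀ j, j < rank → ∀ c, pvE doneB j c = pvE done j c := by
              intro j hj c
              unfold pvE
              rw [hdoneBd, pv_getD_append_lt done [(col, prow, prhs)] j (0, [], 0) (by omega)]
            have hP2 : ∀ j, j < rank → pvP doneB j = pvP done j := by
              intro j hj
              unfold pvP
              rw [hdoneBd, pv_getD_append_lt done [(col, prow, prhs)] j (0, [], 0) (by omega)]
            have hINVm2 : ∀ i < rank, ∀ c, pvJ n_cols m2 b2v i c
                = pvE doneB i c - ∑ j ∈ Finset.Ico (i+1) rank, pvE doneB i (pvP doneB j) * pvJ n_cols m2 b2v j c := by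
              intro i hi c
              rw [hJ2 i hi c, hE2 i hi c]
              have hsum : ∑ j ∈ Finset.Ico (i+1) rank, pvE doneB i (pvP doneB j) * pvJ n_cols m2 b2v j c
                  = ∑ j ∈ Finset.Ico (i+1) rank, pvE done i (pvP done j) * pvJ n_cols m b j c := by
                apply Finset.sum_congr rfl
                intro j hj
                have hjr := (Finset.mem_Ico.mp hj).2
                rw [hP2 j hjr, hE2 i hi (pvP done j), hJ2 j hjr c]
              rw [hsum]
              exact h13 i hi c
            have hstep : ∀ i < rank, ∀ c, pvJ n_cols m3 b3 i c
                = pvJ n_cols m2 b2v i c - pvJ n_cols m2 b2v i (pvP doneB rank) * pvE doneB rank c := by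
              intro i hi c
              rw [hPrank, hErank c]
              have hilt : i < n_rows := by omega
              have hleni : n_cols ≤ (m2.getD i []).length := hm2rowsD i hilt
              have hlenrk : n_cols ≤ (m2.getD rank []).length := hm2rowsD rank (by omega)
              have hr3 := hrow3 i (List.mem_range.mpr hilt) (by omega) (by omega) (by omega)
              by_cases hfz : (m2.getD i []).getD col 0 % 3 = 0
              · rw [if_neg (not_not_intro hfz)] at hr3
                have hz : pvJ n_cols m2 b2v i col = 0 := by
                  unfold pvJ
                  rw [pvRow_getD _ _ _ _ hcoln hleni]
                  exact pv_cast_eq_zero _ hfz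
                rw [hz, zero_mul, sub_zero]
                unfold pvJ
                rw [hr3.1, hr3.2]
              · rw [if_pos hfz] at hr3
                rcases lt_trichotomy c n_cols with hc | hc | hc
                · unfold pvJ
                  rw [hr3.1, hr3.2,
                      pvRow_getD _ _ _ _ hc (by simp), pvRow_getD _ _ _ _ hc hleni,
                      pvRow_getD _ _ _ _ hcoln hleni,
                      pv_getD_map_range _ _ _ hc,
                      pv_getD_append_lt _ _ _ _ (by rw [hprowlen]; exact hc),
                      hprowval, pv_getD_take _ _ _ _ hc,
                      pv_cast_emod, Int.cast_sub, Int.cast_mul, pv_cast_emod]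
                · rw [hc]
                  unfold pvJ
                  rw [hr3.1, hr3.2,
                      pvRow_getD_last _ _ _ (by simp), pvRow_getD_last _ _ _ hleni,
                      pvRow_getD _ _ _ _ hcoln hleni,
                      show (prow ++ [prhs]).getD n_cols 0 = prhs from by
                        rw [← hprowlen]; exact pv_getD_append_len _ _ _,
                      hprhsval, pv_cast_emod, Int.cast_sub, Int.cast_mul, pv_cast_emod]
                · have hJ3z : pvJ n_cols m3 b3 i c = 0 := by
                    unfold pvJ
                    rw [List.getD_eq_default _ _ (by simp [List.length_take]; omega)]
                    simp
                  have hJ2z : pvJ n_cols m2 b2v i c = 0 := by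
                    unfold pvJ
                    rw [List.getD_eq_default _ _ (by simp [List.length_take]; omega)]
                    simp
                  have hEz : (((prow ++ [prhs]).getD c 0 : Int) : ZMod 3) = 0 := by
                    rw [List.getD_eq_default _ _ (by simp [hprowlen]; omega)]
                    simp
                  rw [hJ3z, hJ2z, hEz, mul_zero, sub_zero]
            have hkk : ∀ c, pvJ n_cols m3 b3 rank c = pvE doneB rank c := by
              intro c
              rw [hErank c]
              unfold pvJ
              rw [(hunch rank (Or.inr rfl)).1, (hunch rank (Or.inr rfl)).2, ← hprowval, ← hprhsval]
            have hR13 := pvInvStep rank (pvJ n_cols m2 b2v) (pvJ n_cols m3 b3) (pvE doneB)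
              (pvP doneB) hstep hkk hINVm2
            exact ih (col+1) m3 b3 (rank+1) (pivots ++ [col]) doneB
              (rest.map (pvReduceRow col prow prhs)) (by omega)
              ⟨hm3len.trans hm2len, hb3len.trans hb2len, h3, hR4, by omega,
               by rw [hdoneBd]; simp [h6],
               by rw [hdoneBd, List.map_append, ← h7]; rfl,
               List.pairwise_append.mpr ⟨h8, List.pairwise_singleton _ _, fun a ha bq hbq => by
                 rw [List.mem_singleton.mp hbq]; exact h9 a ha⟩,
               fun q hq => by
                 rcases List.mem_append.mp hq with hq | hq
                 · have := h9 q hq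
                   omega
                 · rw [List.mem_singleton.mp hq]
                   omega,
               fun d hd => by
                 rcases List.mem_append.mp hd with hd | hd
                 · exact h10 d hd
                 · rw [List.mem_singleton.mp hd]
                   exact hprowlen,
               hR11, hR12, hR13⟩
      · have hrkeq : n_rows ≤ rank := by omega
        have htodonil : todo = [] := by
          rw [h11]
          have hz : n_rows - rank = 0 := by omega
          rw [hz]
          rfl
        rw [pvRowReduce_stop n_rows n_cols rank hrkeq, htodonil, pvForward_stuck]
        exact ⟨h1, h2, h3, h4, h5, h6, h7, h8, fun q hq => by have := h9 q hq; omega, h10,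
               htodonil ▸ h11, h12, h13⟩

-- ===== VERDICT (by name: the statement is the Claim_ definition above) =====
theorem solve_linear_mod3_spec : Claim_equal_solve_linear_mod3 := by
  intro A b _hdom hpre
  obtain ⟨hne, hrows, hlen⟩ := hpre
  unfold Spec_solve_linear_mod3
  simp only [solve_linear_mod3, solve_linear_mod3_alt]
  have hn0 : A.length ≠ 0 := fun h => hne (List.eq_nil_of_length_eq_zero h)
  rw [if_pos hn0, List.range_eq_range']
  set n_cols := (A.getD 0 []).length with hncolsd
  have hinit : List.zipWith (fun (r : List Int) v => (r.take n_cols, v)) A b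
      = (List.range' 0 A.length).map (fun i => ((A.getD i []).take n_cols, b.getD i 0)) := by
    apply List.ext_getElem
    · rw [List.length_zipWith, List.length_map, List.length_range']
      omega
    · intro i h1 h2
      have hia : i < A.length := by
        rw [List.length_zipWith] at h1
        omega
      rw [List.getElem_zipWith]
      simp only [List.getElem_map, List.getElem_range']
      rw [show 0 + 1 * i = i from by omega,
          List.getD_eq_getElem _ _ hia, List.getD_eq_getElem _ _ (by omega)]
  have hrel0 : pvRel A.length n_cols b.length 0 A b 0 [] []
      (List.zipWith (fun (r : List Int) v => (r.take n_cols, v)) A b) :=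
    ⟨rfl, rfl, hlen, hrows, Nat.zero_le _, rfl, rfl, List.Pairwise.nil,
     fun q hq => absurd hq (List.not_mem_nil),
     fun d hd => absurd hd (List.not_mem_nil),
     by rw [Nat.sub_zero]; exact hinit,
     fun i hi => absurd hi (Nat.not_lt_zero i),
     fun i hi => absurd hi (Nat.not_lt_zero i)⟩
  have hcorr := pvLoop_corr A.length n_cols b.length n_cols 0 A b 0 [] []
    (List.zipWith (fun (r : List Int) v => (r.take n_cols, v)) A b) (by omega) hrel0
  obtain ⟨f1, f2, f3, f4, f5, f6, f7, f8, f9, f10, f11, f12, f13⟩ := hcorr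
  set RA := pvRowReduceLoop A.length n_cols n_cols A b 0 0 [] with hRAd
  set RB := pvForward n_cols (List.range' 0 n_cols) []
    (List.zipWith (fun (r : List Int) v => (r.take n_cols, v)) A b) with hRBd
  have hany : RB.2.any (fun t => t.2 % 3 != 0)
      = (List.range' RA.1 (A.length - RA.1)).any (fun i => RA.2.2.1.getD i 0 % 3 != 0) := by
    rw [f11, List.any_map]
    exact pv_any_congr _ _ _ (fun r _ => rfl)
  rw [hany]
  by_cases hcons : (List.range' RA.1 (A.length - RA.1)).any (fun i => RA.2.2.1.getD i 0 % 3 != 0) = true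
  · rw [if_pos hcons, if_pos hcons]
  · rw [if_neg hcons, if_neg hcons]
    congr 1
    -- both readouts are the first-match lookup over the pivots
    have hnodup : RA.2.2.2.Nodup := List.Pairwise.imp (fun h => Nat.ne_of_lt h) f8
    obtain ⟨hAlen, hAc⟩ := pvFoldA_char RA.2.2.1 RA.2.2.2 0
      ((List.range' 0 n_cols).map (fun _ => (0 : Int)))
      (fun q hq => by rw [List.length_map, List.length_range']; exact f9 q hq) hnodup
    have hpivlt' : ∀ d ∈ RB.1, d.1 < n_cols := by
      intro d hd
      exact f9 d.1 (by rw [f7]; exact List.mem_map.mpr ⟨d, hd, rfl⟩)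
    have hbnd' : ∀ i < RB.1.length, 0 ≤ RA.2.2.1.getD i 0 ∧ RA.2.2.1.getD i 0 < 3 := by
      intro i hi
      exact f12 i (by omega)
    have hINV' : ∀ i < RB.1.length, ∀ c : Nat, pvJ n_cols RA.2.1 RA.2.2.1 i c
        = pvE RB.1 i c - ∑ j ∈ Finset.Ico (i+1) RB.1.length,
            pvE RB.1 i (pvP RB.1 j) * pvJ n_cols RA.2.1 RA.2.2.1 j c := by
      intro i hi c
      have := f13 i (by omega) c
      rw [← f6]
      exact this
    obtain ⟨hBlen, hBc⟩ := pvFoldB_char n_cols RB.1 RA.2.1 RA.2.2.1 hpivlt'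
      (f7 ▸ f8) f10 (by omega) f4 hbnd' hINV' RB.1.length 0 (by omega)
    rw [List.drop_zero] at hBlen hBc
    apply List.ext_getElem
    · rw [hAlen, hBlen, List.length_map, List.length_range']
    · intro c hc1 hc2
      rw [← List.getD_eq_getElem _ 0 hc1, ← List.getD_eq_getElem _ 0 hc2, hAc c, hBc c, ← f7]
      have hc : c < n_cols := by
        rw [hBlen] at hc2
        exact hc2
      by_cases hmemc : c ∈ RA.2.2.2
      · rw [if_pos hmemc, if_pos hmemc]
      · rw [if_neg hmemc, if_neg hmemc,
            pv_getD_map_range' (fun _ => (0 : Int)) 0 n_cols c 0 hc]
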